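-- pv_equiv track=rewrite | github.com/mlelarge/graph-conjectures | problems/directed_path_minimum_outdegree/scripts/k4_score_profile_independent_check.py | has_path_of_length_at_least_8
-- ===== SOURCE A (Python) =====
-- def has_path_of_length_at_least_8(arcs, n):
--     """DFS for a directed simple path of length >= 8."""
--     adj = {v: set() for v in range(n)}
--     for (u, w) in arcs:
--         adj[u].add(w)
--
--     found = [False]
--
--     def dfs(v, visited, length):
--         if found[0]:
--             return
--         if length >= 8:
--             found[0] = True
--             return
--         for w in adj[v]:
--             if w not in visited:
--                 visited.add(w)
--                 dfs(w, visited, length + 1)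
--                 if found[0]:
--                     return
--                 visited.discard(w)
--
--     for start in range(n):
--         if found[0]:
--             break
--         dfs(start, {start}, 0)
--
--     return found[0]
-- ===== SOURCE B (Python) =====
-- def has_path_of_length_at_least_8(arcs, n):
--     """Iterative DFS over an explicit stack of simple paths (no recursion, no shared flag)."""
--     adj = {v: set() for v in range(n)}
--     for (u, w) in arcs:
--         adj[u].add(w)
--     for start in range(n):
--         stack = [[start]]
--         while stack:
--             path = stack.pop()
--             if len(path) >= 9:
--                 return True
--             stack.extend(path + [w] for w in adj[path[-1]] if w not in path)
--     return False
-- ===== Notes on version B (the rewrite author's own statement) =====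
-- stated objective: alternative
-- what changed: Replaces A's recursive DFS with a mutable shared visited set and a nonlocal found-flag by an iterative DFS over an explicit stack of simple paths (pop a path, return True at 9 vertices, push its unvisited-extension paths).
import Mathlib
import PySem

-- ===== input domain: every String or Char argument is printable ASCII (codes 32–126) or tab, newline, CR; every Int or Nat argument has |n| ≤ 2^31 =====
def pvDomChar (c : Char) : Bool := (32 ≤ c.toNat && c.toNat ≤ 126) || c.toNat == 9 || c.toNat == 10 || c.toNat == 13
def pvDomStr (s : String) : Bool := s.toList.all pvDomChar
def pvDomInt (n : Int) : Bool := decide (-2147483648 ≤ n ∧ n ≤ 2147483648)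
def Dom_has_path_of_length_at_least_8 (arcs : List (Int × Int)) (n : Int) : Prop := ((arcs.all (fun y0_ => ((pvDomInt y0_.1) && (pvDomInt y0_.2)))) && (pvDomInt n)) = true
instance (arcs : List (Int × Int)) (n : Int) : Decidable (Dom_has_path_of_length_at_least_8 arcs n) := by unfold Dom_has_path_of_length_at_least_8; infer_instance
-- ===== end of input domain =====

-- B replaces A's recursive DFS (mutable visited set + shared found flag) by an iterative DFS
-- over an explicit stack of simple paths; same return value on Pre_ (objective: alternative).

-- ===== PORT A =====
-- adjacency construction, identical lines in both Pythons:
-- adj = {v: set() for v in range(n)}; for (u, w) in arcs: adj[u].add(w)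
-- (adj[u].add(w) raises KeyError when u is not a key: excluded by Pre_; the port's
--  Dict.modify silently inserts there instead.)
def pvBuildAdj (arcs : List (Int × Int)) (n : Int) : PySem.Dict Int (PySem.Set Int) :=
  arcs.foldl (fun d p => d.modify p.1 PySem.Set.empty (fun s => PySem.Set.add s p.2))
    ((PySem.List.pyRange 0 n 1).foldl (fun d v => d.insert v PySem.Set.empty) PySem.Dict.empty)

-- A's dfs: the shared `found` flag is monotone (once true every call returns at once),
-- so dfs-returning-found is exactly the short-circuit `any` below; `adj[v]` raising
-- KeyError on a vertex outside range(n) is excluded by Pre_ (port reads an empty set).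
def pvDfsA (adj : PySem.Dict Int (PySem.Set Int)) (v : Int) (visited : PySem.Set Int)
    (length : Int) : Bool :=
  if _h : 8 ≤ length then true
  else
    (adj.getD v PySem.Set.empty).any (fun w =>
      !(PySem.Set.contains visited w) && pvDfsA adj w (PySem.Set.add visited w) (length + 1))
termination_by (8 - length).toNat
decreasing_by omega

def has_path_of_length_at_least_8 (arcs : List (Int × Int)) (n : Int) : Bool :=
  let adj := pvBuildAdj arcs n
  (PySem.List.pyRange 0 n 1).any (fun start => pvDfsA adj start (PySem.Set.ofList [start]) 0)

-- ===== PORT B =====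
-- path[-1]; every path on the stack is nonempty, so the default is never read
def pvLast (p : List Int) : Int := p.getLastD 0

-- [path + [w] for w in adj[path[-1]] if w not in path]
def pvExts (adj : PySem.Dict Int (PySem.Set Int)) (p : List Int) : List (List Int) :=
  ((adj.getD (pvLast p) PySem.Set.empty).filter (fun w => !(p.contains w))).map
    (fun w => p ++ [w])

-- termination measure for the while loop: each popped path is replaced by strictly
-- lighter extensions (weights (maxdeg+2)^(9-len), paths of length ≥ 9 end the loop)
def pvDeg (adj : PySem.Dict Int (PySem.Set Int)) : Nat :=
  adj.values.foldl (fun acc s => max acc s.length) 0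

def pvMeasureB (adj : PySem.Dict Int (PySem.Set Int)) (stack : List (List Int)) : Nat :=
  (stack.map (fun p => (pvDeg adj + 2) ^ (9 - p.length))).sum

theorem pvGetD_len_le (adj : PySem.Dict Int (PySem.Set Int)) (v : Int) :
    (adj.getD v PySem.Set.empty).length ≤ pvDeg adj := by
  rw [PySem.Dict.getD_eq_get?_getD]
  cases hg : adj.get? v with
  | none => simp [PySem.Set.empty]
  | some s =>
    have hmem : s ∈ adj.values := by
      have h := PySem.Dict.mem_items_of_get?_eq_some adj hg
      have : (fun q : Int × PySem.Set Int => q.2) (v, s) ∈ adj.items.map (fun q => q.2) :=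
        List.mem_map_of_mem h
      simpa [PySem.Dict.values] using this
    simpa using (PySem.List.le_foldl_max_nat adj.values List.length 0).2 s hmem

theorem pvExts_len_le (adj : PySem.Dict Int (PySem.Set Int)) (p : List Int) :
    (pvExts adj p).length ≤ pvDeg adj := by
  unfold pvExts
  rw [List.length_map]
  exact le_trans (List.length_filter_le _ _) (pvGetD_len_le adj (pvLast p))

theorem pvMeasureB_step (adj : PySem.Dict Int (PySem.Set Int)) (p : List Int)
    (rest : List (List Int)) (h : p.length ≤ 8) :
    pvMeasureB adj ((pvExts adj p).reverse ++ rest) < pvMeasureB adj (p :: rest) := by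
  unfold pvMeasureB
  rw [List.map_append, List.sum_append, List.map_reverse, List.sum_reverse,
    List.map_cons, List.sum_cons]
  have hconst : ((pvExts adj p).map (fun q => (pvDeg adj + 2) ^ (9 - q.length))).sum
      = (pvExts adj p).length * (pvDeg adj + 2) ^ (8 - p.length) := by
    unfold pvExts
    rw [List.map_map, List.length_map]
    have hc : ((fun q => (pvDeg adj + 2) ^ (9 - List.length q)) ∘ fun w => p ++ [w])
        = fun (_ : Int) => (pvDeg adj + 2) ^ (8 - p.length) := by
      funext w
      simp only [Function.comp, List.length_append, List.length_cons, List.length_nil]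
      congr 1
      omega
    rw [hc, List.map_const', List.sum_replicate, smul_eq_mul]
  rw [hconst]
  have h1 : (pvExts adj p).length ≤ pvDeg adj := pvExts_len_le adj p
  have h2 : 0 < (pvDeg adj + 2) ^ (8 - p.length) := pow_pos (by omega) _
  have h3 : 9 - p.length = (8 - p.length) + 1 := by omega
  rw [h3, pow_succ]
  nlinarith

-- while stack: path = stack.pop(); if len(path) >= 9: return True; stack.extend(pvExts …)
-- (Lean list head = Python stack top; Python extend+pop-from-end = reverse-prepend here)
def pvLoopB (adj : PySem.Dict Int (PySem.Set Int)) (stack : List (List Int)) : Bool :=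
  match stack with
  | [] => false
  | p :: rest =>
    if 9 ≤ p.length then true
    else pvLoopB adj ((pvExts adj p).reverse ++ rest)
termination_by pvMeasureB adj stack
decreasing_by
  exact pvMeasureB_step adj p rest (by omega)

def has_path_of_length_at_least_8_alt (arcs : List (Int × Int)) (n : Int) : Bool :=
  let adj := pvBuildAdj arcs n
  (PySem.List.pyRange 0 n 1).any (fun start => pvLoopB adj [[start]])

-- ===== PRECONDITION & SPEC =====
-- Pre_ excludes arcs with an endpoint outside range(n): there the Python A raises KeyError
-- (at construction for sources, on first visit for targets) or — when a level-8 path is found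
-- first — returns while B's different exploration order may hit the KeyError instead.
def Pre_has_path_of_length_at_least_8 (arcs : List (Int × Int)) (n : Int) : Prop :=
  ∀ p ∈ arcs, 0 ≤ p.1 ∧ p.1 < n ∧ 0 ≤ p.2 ∧ p.2 < n
instance (arcs : List (Int × Int)) (n : Int) : Decidable (Pre_has_path_of_length_at_least_8 arcs n) := by unfold Pre_has_path_of_length_at_least_8; infer_instance

def pvWitness_has_path_of_length_at_least_8 : (List (Int × Int)) × Int := ([((0:Int), (1:Int))], (2:Int))

def Spec_has_path_of_length_at_least_8 (arcs : List (Int × Int)) (n : Int) (out : Bool) : Prop := out = has_path_of_length_at_least_8_alt arcs n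
instance (arcs : List (Int × Int)) (n : Int) (out : Bool) : Decidable (Spec_has_path_of_length_at_least_8 arcs n out) := by unfold Spec_has_path_of_length_at_least_8; infer_instance

-- ===== CLAIM (what is proved, stated in full; the proofs are below) =====
def Claim_equal_has_path_of_length_at_least_8 : Prop := ∀ (arcs : List (Int × Int)) (n : Int), Dom_has_path_of_length_at_least_8 arcs n → Pre_has_path_of_length_at_least_8 arcs n → Spec_has_path_of_length_at_least_8 arcs n (has_path_of_length_at_least_8 arcs n)

-- ===== LEMMAS AND PROOFS =====

-- A's dfs applied to the state a stack path represents
def pvDfsPath (adj : PySem.Dict Int (PySem.Set Int)) (p : List Int) : Bool :=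
  pvDfsA adj (pvLast p) (PySem.Set.ofList p) ((p.length : Int) - 1)

theorem pvDfsA_congr (k : Nat) : ∀ (adj : PySem.Dict Int (PySem.Set Int)) (v : Int)
    (s t : PySem.Set Int) (length : Int), (8 - length).toNat = k →
    (∀ x, (x ∈ s) ↔ (x ∈ t)) → pvDfsA adj v s length = pvDfsA adj v t length := by
  induction k using Nat.strong_induction_on with
  | _ k IH =>
    intro adj v s t length hk hm
    rw [pvDfsA, pvDfsA]
    split
    · rfl
    · rename_i h
      refine List.any_congr rfl (fun w => ?_)
      have hc : PySem.Set.contains s w = PySem.Set.contains t w := by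
        simp [PySem.Set.contains, List.contains_eq_mem, hm w]
      rw [hc]
      have hrec : pvDfsA adj w (PySem.Set.add s w) (length + 1)
          = pvDfsA adj w (PySem.Set.add t w) (length + 1) := by
        refine IH ((8 - (length + 1)).toNat) (by omega) adj w _ _ (length + 1) rfl ?_
        intro x
        rw [PySem.Set.mem_add, PySem.Set.mem_add, hm x]
      rw [hrec]

theorem pvLoopB_eq_any (adj : PySem.Dict Int (PySem.Set Int)) (stack : List (List Int))
    (hne : ∀ p ∈ stack, p ≠ []) : pvLoopB adj stack = stack.any (pvDfsPath adj) := by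
  revert hne
  induction stack using pvLoopB.induct adj with
  | case1 =>
    intro _
    simp [pvLoopB]
  | case2 p rest h =>
    intro _
    have hp : pvDfsPath adj p = true := by
      unfold pvDfsPath
      rw [pvDfsA]
      rw [dif_pos (by omega : (8:Int) ≤ (p.length : Int) - 1)]
    rw [pvLoopB]
    simp [h, List.any_cons, hp]
  | case3 p rest h IH =>
    intro hne
    have hpne : p ≠ [] := hne p (List.mem_cons_self)
    rw [pvLoopB, if_neg h]
    rw [IH ?hne']
    case hne' =>
      intro q hq
      rcases List.mem_append.mp hq with hq | hq
      · have hq' : q ∈ pvExts adj p := List.mem_reverse.mp hq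
        unfold pvExts at hq'
        rcases List.mem_map.mp hq' with ⟨w, _, hw⟩
        subst hw
        simp
      · exact hne q (List.mem_cons_of_mem _ hq)
    rw [List.any_append, List.any_reverse, List.any_cons]
    have hsuff : (pvExts adj p).any (pvDfsPath adj) = pvDfsPath adj p := by
      unfold pvExts
      rw [List.any_map, List.any_filter]
      unfold pvDfsPath
      rw [pvDfsA]
      rw [dif_neg (by omega : ¬ (8:Int) ≤ (p.length : Int) - 1)]
      refine List.any_congr rfl (fun w => ?_)
      show (!p.contains w && pvDfsPath adj (p ++ [w]))
          = (!(PySem.Set.contains (PySem.Set.ofList p) w)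
              && pvDfsA adj w ((PySem.Set.ofList p).add w) ((p.length : Int) - 1 + 1))
      have hlast : pvLast (p ++ [w]) = w := by
        simp [pvLast]
      have hlen : (((p ++ [w]).length : Int)) - 1 = (p.length : Int) - 1 + 1 := by
        simp [List.length_append]
      have hcong : pvDfsA adj w (PySem.Set.ofList (p ++ [w])) ((p.length : Int) - 1 + 1)
          = pvDfsA adj w ((PySem.Set.ofList p).add w) ((p.length : Int) - 1 + 1) := by
        refine pvDfsA_congr ((8 - ((p.length : Int) - 1 + 1)).toNat) adj w _ _ _ rfl ?_
        intro x
        rw [PySem.Set.mem_ofList, PySem.Set.mem_add, PySem.Set.mem_ofList]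
        simp [List.mem_append]
      have h2 : (!p.contains w) = !(PySem.Set.contains (PySem.Set.ofList p) w) := by
        simp [PySem.Set.contains, List.contains_eq_mem, PySem.Set.mem_ofList]
      unfold pvDfsPath
      rw [hlast, hlen, hcong, h2]
    rw [hsuff]

-- ===== VERDICT (by name: the statement is the Claim_ definition above) =====
theorem has_path_of_length_at_least_8_spec : Claim_equal_has_path_of_length_at_least_8 := by
  intro arcs n _ _
  unfold Spec_has_path_of_length_at_least_8
  unfold has_path_of_length_at_least_8 has_path_of_length_at_least_8_alt
  refine List.any_congr rfl (fun s => ?_)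
  rw [pvLoopB_eq_any _ _ (by simp)]
  have : pvDfsPath (pvBuildAdj arcs n) [s]
      = pvDfsA (pvBuildAdj arcs n) s (PySem.Set.ofList [s]) 0 := by
    unfold pvDfsPath
    norm_num [pvLast]
  simp [List.any_cons, this]
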